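-- pv_equiv track=rewrite | github.com/cmerwich/participant-analysis | iaa-ann-vs-mimi/translate.py | MakeOffsets
-- ===== SOURCE A (Python) =====
-- def MakeOffsets(od):
--     offset = 0
--     jumps_list = []
--     for k, v in od.items():
--         point = k + (offset if v == 1 else 0)
--         offset += v
--         jumps_list.append((point, offset))
--     return jumps_list
-- ===== SOURCE B (Python) =====
-- def MakeOffsets(od):
--     # Two-pass decomposition: build the full prefix-sum table of the values first,
--     # then shape each output tuple from the items zipped with that table.
--     items = list(od.items())
--     cum = []
--     total = 0
--     for _, v in items:
--         total += v
--         cum.append(total)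
--     return [(k + (c - v if v == 1 else 0), c)
--             for (k, v), c in zip(items, cum)]
-- ===== Notes on version B (the rewrite author's own statement) =====
-- stated objective: alternative
-- what changed: Replaces the single loop threading a running offset with a two-pass decomposition: first materialize the full prefix-sum table of the values, then zip the items with that table and shape each tuple, deriving the pre-offset as cum[i]-v.
import Mathlib
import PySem

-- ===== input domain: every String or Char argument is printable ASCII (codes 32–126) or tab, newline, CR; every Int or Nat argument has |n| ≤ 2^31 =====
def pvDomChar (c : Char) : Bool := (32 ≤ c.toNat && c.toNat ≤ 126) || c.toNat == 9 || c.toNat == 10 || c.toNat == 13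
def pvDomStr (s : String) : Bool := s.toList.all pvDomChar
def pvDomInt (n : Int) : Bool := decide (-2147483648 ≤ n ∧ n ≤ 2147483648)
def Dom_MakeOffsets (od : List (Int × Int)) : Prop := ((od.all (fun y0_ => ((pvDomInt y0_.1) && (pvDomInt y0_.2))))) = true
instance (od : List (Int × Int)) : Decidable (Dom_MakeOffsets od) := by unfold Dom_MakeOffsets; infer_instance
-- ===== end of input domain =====

-- B changes the decomposition: a prefix-sum table is built first, then the output tuples
-- are shaped by zipping items with that table (objective: alternative, same cost).

-- ===== PORT A =====
-- one loop threading (offset, jumps_list)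
def MakeOffsets (od : List (Int × Int)) : List (Int × Int) :=
  (od.foldl (fun (st : Int × List (Int × Int)) kv =>
      let point := kv.1 + (if kv.2 = 1 then st.1 else 0)
      let offset := st.1 + kv.2
      (offset, st.2 ++ [(point, offset)])) (0, [])).2

-- ===== PORT B =====
-- first pass: the full prefix-sum table of the values
def pvPrefixSums (vs : List Int) : List Int :=
  (vs.foldl (fun (st : Int × List Int) v =>
      (st.1 + v, st.2 ++ [st.1 + v])) (0, [])).2

-- second pass: zip items with the table and shape each tuple
def MakeOffsets_alt (od : List (Int × Int)) : List (Int × Int) :=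
  (od.zip (pvPrefixSums (od.map (·.2)))).map
    (fun p => (p.1.1 + (if p.1.2 = 1 then p.2 - p.1.2 else 0), p.2))

-- ===== PRECONDITION & SPEC =====
def Spec_MakeOffsets (od : List (Int × Int)) (out : List (Int × Int)) : Prop := out = MakeOffsets_alt od
instance (od : List (Int × Int)) (out : List (Int × Int)) : Decidable (Spec_MakeOffsets od out) := by unfold Spec_MakeOffsets; infer_instance

-- ===== CLAIM (what is proved, stated in full; the proofs are below) =====
def Claim_equal_MakeOffsets : Prop := ∀ (od : List (Int × Int)), Dom_MakeOffsets od → Spec_MakeOffsets od (MakeOffsets od)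

-- ===== LEMMAS AND PROOFS =====

-- the common recursive shape both sides reduce to, starting from offset t
def pvShape (od : List (Int × Int)) (t : Int) : List (Int × Int) :=
  match od with
  | [] => []
  | (k, v) :: rest => (k + (if v = 1 then t else 0), t + v) :: pvShape rest (t + v)

lemma pvA_go (od : List (Int × Int)) : ∀ (t : Int) (acc : List (Int × Int)),
    (od.foldl (fun (st : Int × List (Int × Int)) kv =>
        let point := kv.1 + (if kv.2 = 1 then st.1 else 0)
        let offset := st.1 + kv.2
        (offset, st.2 ++ [(point, offset)])) (t, acc)).2 = acc ++ pvShape od t := by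
  induction od with
  | nil => intro t acc; simp [pvShape]
  | cons kv rest ih =>
    intro t acc
    simp only [List.foldl_cons, pvShape, ih]
    simp

lemma pvPS_go (vs : List Int) : ∀ (t : Int) (acc : List Int),
    (vs.foldl (fun (st : Int × List Int) v =>
        (st.1 + v, st.2 ++ [st.1 + v])) (t, acc)).2
      = acc ++ (vs.foldl (fun (st : Int × List Int) v =>
        (st.1 + v, st.2 ++ [st.1 + v])) (t, [])).2 := by
  induction vs with
  | nil => intro t acc; simp
  | cons v rest ih =>
    intro t acc
    simp only [List.foldl_cons, List.nil_append]
    rw [ih (t + v) (acc ++ [t + v]), ih (t + v) [t + v]]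
    simp

lemma pvB_go (od : List (Int × Int)) : ∀ (t : Int),
    ((od.zip ((od.map (·.2)).foldl (fun (st : Int × List Int) v =>
        (st.1 + v, st.2 ++ [st.1 + v])) (t, [])).2).map
      (fun p => (p.1.1 + (if p.1.2 = 1 then p.2 - p.1.2 else 0), p.2)))
      = pvShape od t := by
  induction od with
  | nil => intro t; simp [pvShape]
  | cons kv rest ih =>
    intro t
    obtain ⟨k, v⟩ := kv
    simp only [List.map_cons, List.foldl_cons]
    rw [pvPS_go]
    simp only [List.cons_append, List.nil_append, List.zip_cons_cons, List.map_cons, pvShape]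
    rw [ih (t + v)]
    congr 1
    simp only [Prod.mk.injEq, and_true]
    split <;> omega

-- ===== VERDICT (by name: the statement is the Claim_ definition above) =====
theorem MakeOffsets_spec : Claim_equal_MakeOffsets := by
  intro od _
  unfold Spec_MakeOffsets MakeOffsets MakeOffsets_alt pvPrefixSums
  rw [pvA_go, pvB_go]
  simp
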